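-- pv_equiv track=rewrite | github.com/stopthrowingrocks/advent-of-code-2025 | day4.py | update_lines
-- ===== SOURCE A (Python) =====
-- def has_roll(lines, i, j):
--     if i < 0 or i >= len(lines) or j < 0 or j >= len(lines[i]): return False
--     return lines[i][j] == '@'
--
-- def is_moveable(lines, i, j):
--     dirs = [(-1,-1),(-1,0),(-1,1),(0,-1),(0,1),(1,-1),(1,0),(1,1)]
--     num_adj_rolls = sum([has_roll(lines, i+dir[0],j+dir[1]) for dir in dirs])
--     return num_adj_rolls < 4
--
-- def update_lines(lines):
--     num_before = sum([has_roll(lines, i, j) for i in range(len(lines)) for j in range(len(lines[i]))])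
--     newlines = [
--         ''.join([
--             '@' if has_roll(lines, i, j) and not is_moveable(lines, i, j) else '.'
--             for j in range(len(lines[i]))
--         ]) for i in range(len(lines))
--     ]
--     num_after = sum([has_roll(newlines, i,j) for i in range(len(newlines)) for j in range(len(newlines[i]))])
--     return num_before - num_after, newlines
-- ===== SOURCE B (Python) =====
-- def count_adj(lines, i, j):
--     cnt = 0
--     for di in (-1, 0, 1):
--         for dj in (-1, 0, 1):
--             if di == 0 and dj == 0:
--                 continue
--             ii, jj = i + di, j + dj
--             if 0 <= ii < len(lines) and 0 <= jj < len(lines[ii]) and lines[ii][jj] == '@':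
--                 cnt += 1
--     return cnt
--
-- def _process_row(lines, i, row):
--     removed = 0
--     chars = []
--     for j, c in enumerate(row):
--         if c == '@' and count_adj(lines, i, j) >= 4:
--             chars.append('@')
--         else:
--             chars.append('.')
--             if c == '@':
--                 removed += 1
--     return removed, ''.join(chars)
--
-- def update_lines(lines):
--     removed = 0
--     rows = []
--     for i, row in enumerate(lines):
--         r, s = _process_row(lines, i, row)
--         removed += r
--         rows.append(s)
--     return removed, rows
-- ===== Notes on version B (the rewrite author's own statement) =====
-- stated objective: simpler
-- what changed: A makes three sweeps over the grid (count rolls before, rebuild every row via has_roll/is_moveable per cell, count rolls after, return the difference); B makes a single pass that, per cell, counts the bounds-checked adjacent rolls directly and both builds the new row and increments a running 'removed' counter when a roll has fewer than 4 neighbours, so the before/after counting sweeps disappear.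
import Mathlib
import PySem

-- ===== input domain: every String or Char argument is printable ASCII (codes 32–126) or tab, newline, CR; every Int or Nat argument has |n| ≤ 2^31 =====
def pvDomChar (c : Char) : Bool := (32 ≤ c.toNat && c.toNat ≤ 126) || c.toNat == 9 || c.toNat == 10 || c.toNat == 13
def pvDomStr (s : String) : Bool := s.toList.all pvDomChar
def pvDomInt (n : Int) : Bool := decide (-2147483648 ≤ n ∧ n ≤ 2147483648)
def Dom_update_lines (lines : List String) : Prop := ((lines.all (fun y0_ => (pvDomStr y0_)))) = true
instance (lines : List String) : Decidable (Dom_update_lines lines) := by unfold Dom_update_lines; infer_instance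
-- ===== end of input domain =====

set_option maxRecDepth 10000


-- B does one pass over the cells, counting removed rolls directly while building the new rows,
-- instead of A's three sweeps (count before, rebuild, count after); objective: simpler (same asymptotic cost).

-- ===== PORT A =====
-- grids are handled as List (List Char) via String.toList (exact: Python indexes strings by code point)
def hasRoll (g : List (List Char)) (i j : Int) : Bool :=
  if i < 0 ∨ (g.length : Int) ≤ i then false
  else if j < 0 ∨ ((g.getD i.toNat []).length : Int) ≤ j then false
  else (g.getD i.toNat []).getD j.toNat ' ' == '@'

def isMoveable (g : List (List Char)) (i j : Int) : Bool :=
  let dirs : List (Int × Int) := [(-1,-1),(-1,0),(-1,1),(0,-1),(0,1),(1,-1),(1,0),(1,1)]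
  let numAdj : Int := (dirs.map (fun d => if hasRoll g (i + d.1) (j + d.2) then (1:Int) else 0)).sum
  decide (numAdj < 4)

def update_lines (lines : List String) : Int × List String :=
  let g := lines.map String.toList
  let numBefore : Int :=
    ((List.range g.length).flatMap (fun (i : Nat) =>
      (List.range ((g.getD i []).length)).map (fun (j : Nat) =>
        if hasRoll g (i : Int) (j : Int) then (1:Int) else 0))).sum
  let newlines : List String :=
    (List.range g.length).map (fun (i : Nat) =>
      String.ofList ((List.range ((g.getD i []).length)).map (fun (j : Nat) =>
        if hasRoll g (i : Int) (j : Int) && !(isMoveable g (i : Int) (j : Int)) then '@' else '.')))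
  let ng := newlines.map String.toList
  let numAfter : Int :=
    ((List.range ng.length).flatMap (fun (i : Nat) =>
      (List.range ((ng.getD i []).length)).map (fun (j : Nat) =>
        if hasRoll ng (i : Int) (j : Int) then (1:Int) else 0))).sum
  (numBefore - numAfter, newlines)

-- ===== PORT B =====
def bCountAdj (g : List (List Char)) (i j : Int) : Int :=
  ([-1, 0, 1] : List Int).foldl (fun a di =>
    ([-1, 0, 1] : List Int).foldl (fun a dj =>
      if di = 0 ∧ dj = 0 then a
      else if 0 ≤ i + di ∧ i + di < (g.length : Int) ∧ 0 ≤ j + dj ∧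
              j + dj < ((g.getD (i + di).toNat []).length : Int) ∧
              (g.getD (i + di).toNat []).getD (j + dj).toNat ' ' = '@'
           then a + 1 else a) a) 0

def bProcessRow (g : List (List Char)) (i : Int) (row : List Char) : Int × List Char :=
  (PySem.List.enumerate row 0).foldl (fun p jc =>
    if jc.2 = '@' ∧ 4 ≤ bCountAdj g i jc.1 then (p.1, p.2 ++ ['@'])
    else ((if jc.2 = '@' then p.1 + 1 else p.1), p.2 ++ ['.'])) (0, [])

def update_lines_alt (lines : List String) : Int × List String :=
  let g := lines.map String.toList
  (PySem.List.enumerate g 0).foldl (fun p ir =>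
    let q := bProcessRow g ir.1 ir.2
    (p.1 + q.1, p.2 ++ [String.ofList q.2])) ((0:Int), ([] : List String))

-- ===== PRECONDITION & SPEC =====
def Spec_update_lines (lines : List String) (out : Int × List String) : Prop := out = update_lines_alt lines
instance (lines : List String) (out : Int × List String) : Decidable (Spec_update_lines lines out) := by unfold Spec_update_lines; infer_instance

-- ===== CLAIM (what is proved, stated in full; the proofs are below) =====
def Claim_equal_update_lines : Prop := ∀ (lines : List String), Dom_update_lines lines → Spec_update_lines lines (update_lines lines)

-- ===== LEMMAS AND PROOFS =====

-- common recursive description of B's row pass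
def rowSpec (g : List (List Char)) (i : Int) : Int → List Char → Int × List Char
  | _, [] => (0, [])
  | j, c :: rest =>
    let t := rowSpec g i (j + 1) rest
    if c = '@' ∧ 4 ≤ bCountAdj g i j then (t.1, '@' :: t.2)
    else ((if c = '@' then t.1 + 1 else t.1), '.' :: t.2)

-- common recursive description of B's grid pass
def gridSpec (g : List (List Char)) : Int → List (List Char) → Int × List String
  | _, [] => (0, [])
  | s, row :: rest =>
    let q := rowSpec g s 0 row
    let t := gridSpec g (s + 1) rest
    (q.1 + t.1, String.ofList q.2 :: t.2)

theorem hasRoll_iff (g : List (List Char)) (i j : Int) :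
    hasRoll g i j = true ↔ (0 ≤ i ∧ i < (g.length : Int) ∧ 0 ≤ j ∧
      j < ((g.getD i.toNat []).length : Int) ∧ (g.getD i.toNat []).getD j.toNat ' ' = '@') := by
  unfold hasRoll
  split_ifs with h1 h2
  · simp only [false_iff]
    rintro ⟨a, b, c, d, e⟩; omega
  · simp only [false_iff]
    rintro ⟨a, b, c, d, e⟩; omega
  · rw [not_or] at h1 h2
    rw [Int.not_lt, Int.not_le] at h1 h2
    simp only [beq_iff_eq]
    constructor
    · intro h
      exact ⟨by omega, by omega, by omega, by omega, h⟩
    · rintro ⟨_, _, _, _, h⟩; exact h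

def adjTerm (g : List (List Char)) (a b : Int) : Int := if hasRoll g a b then 1 else 0

theorem term_eq (g : List (List Char)) (a b x : Int) :
    (if 0 ≤ a ∧ a < (g.length : Int) ∧ 0 ≤ b ∧ b < ((g.getD a.toNat []).length : Int) ∧
        (g.getD a.toNat []).getD b.toNat ' ' = '@'
     then x + 1 else x) = x + adjTerm g a b := by
  by_cases h : 0 ≤ a ∧ a < (g.length : Int) ∧ 0 ≤ b ∧ b < ((g.getD a.toNat []).length : Int) ∧
      (g.getD a.toNat []).getD b.toNat ' ' = '@'
  · rw [if_pos h, adjTerm, if_pos ((hasRoll_iff g a b).mpr h)]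
  · rw [if_neg h, adjTerm, if_neg (fun hb => h ((hasRoll_iff g a b).mp hb)), add_zero]

theorem bCountAdj_eq (g : List (List Char)) (i j : Int) :
    bCountAdj g i j =
      adjTerm g (i + -1) (j + -1) + adjTerm g (i + -1) (j + 0) + adjTerm g (i + -1) (j + 1) +
      adjTerm g (i + 0) (j + -1) + adjTerm g (i + 0) (j + 1) +
      adjTerm g (i + 1) (j + -1) + adjTerm g (i + 1) (j + 0) + adjTerm g (i + 1) (j + 1) := by
  simp only [bCountAdj, List.foldl_cons, List.foldl_nil, term_eq]
  norm_num

theorem adj_eq (g : List (List Char)) (i j : Int) :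
    (([((-1:Int),(-1:Int)),(-1,0),(-1,1),(0,-1),(0,1),(1,-1),(1,0),(1,1)] : List (Int × Int)).map
      (fun d => if hasRoll g (i + d.1) (j + d.2) then (1:Int) else 0)).sum = bCountAdj g i j := by
  have ht : ∀ a b : Int, (if hasRoll g a b then (1:Int) else 0) = adjTerm g a b := fun _ _ => rfl
  simp only [List.map_cons, List.map_nil, List.sum_cons, List.sum_nil, ht]
  rw [bCountAdj_eq]
  ring

theorem moveable_eq (g : List (List Char)) (i j : Int) :
    isMoveable g i j = decide (bCountAdj g i j < 4) := by
  rw [show isMoveable g i j =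
        decide ((([(( -1:Int),(-1:Int)),(-1,0),(-1,1),(0,-1),(0,1),(1,-1),(1,0),(1,1)] : List (Int × Int)).map
          (fun d => if hasRoll g (i + d.1) (j + d.2) then (1:Int) else 0)).sum < 4) from rfl,
      adj_eq]

theorem bProcessRow_fold (g : List (List Char)) (i : Int) :
    ∀ (row : List Char) (s r : Int) (cs : List Char),
      (PySem.List.enumerate row s).foldl (fun p jc =>
          if jc.2 = '@' ∧ 4 ≤ bCountAdj g i jc.1 then (p.1, p.2 ++ ['@'])
          else ((if jc.2 = '@' then p.1 + 1 else p.1), p.2 ++ ['.'])) (r, cs)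
        = (r + (rowSpec g i s row).1, cs ++ (rowSpec g i s row).2) := by
  intro row
  induction row with
  | nil => intro s r cs; simp [PySem.List.enumerate_nil, rowSpec]
  | cons c rest ih =>
    intro s r cs
    rw [PySem.List.enumerate_cons, List.foldl_cons]
    simp only [rowSpec]
    by_cases h : c = '@' ∧ 4 ≤ bCountAdj g i s
    · simp only [if_pos h, ih]
      simp [List.append_assoc]
    · simp only [if_neg h, ih]
      by_cases h2 : c = '@' <;> simp [h2, List.append_assoc, Prod.ext_iff] <;> omega

theorem bProcessRow_eq (g : List (List Char)) (i : Int) (row : List Char) :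
    bProcessRow g i row = rowSpec g i 0 row := by
  unfold bProcessRow
  rw [bProcessRow_fold]
  simp

theorem alt_fold (g : List (List Char)) :
    ∀ (rows : List (List Char)) (s r : Int) (out : List String),
      (PySem.List.enumerate rows s).foldl (fun p ir =>
          let q := bProcessRow g ir.1 ir.2
          (p.1 + q.1, p.2 ++ [String.ofList q.2])) (r, out)
        = (r + (gridSpec g s rows).1, out ++ (gridSpec g s rows).2) := by
  intro rows
  induction rows with
  | nil => intro s r out; simp [PySem.List.enumerate_nil, gridSpec]
  | cons row rest ih =>
    intro s r out
    rw [PySem.List.enumerate_cons, List.foldl_cons]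
    rw [ih]
    simp only [gridSpec, bProcessRow_eq]
    simp [List.append_assoc, Prod.ext_iff, add_assoc]

theorem update_lines_alt_eq (lines : List String) :
    update_lines_alt lines = gridSpec (lines.map String.toList) 0 (lines.map String.toList) := by
  unfold update_lines_alt
  rw [alt_fold]
  simp

theorem rowSpec_eq (g : List (List Char)) (i : Nat) (hi : i < g.length) :
    ∀ (rest : List Char) (j₀ : Nat), rest = (g.getD i []).drop j₀ →
      rowSpec g i j₀ rest =
        (((List.range' j₀ rest.length).map (fun (j : Nat) =>
            if hasRoll g (i : Int) (j : Int) && isMoveable g (i : Int) (j : Int) then (1:Int) else 0)).sum,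
         (List.range' j₀ rest.length).map (fun (j : Nat) =>
            if hasRoll g (i : Int) (j : Int) && !(isMoveable g (i : Int) (j : Int)) then '@' else '.')) := by
  intro rest
  induction rest with
  | nil => intro j₀ h; simp [rowSpec]
  | cons c rest' ih =>
    intro j₀ h
    have hg : (g.getD i []).drop j₀ = c :: rest' := h.symm
    have hlen : j₀ < (g.getD i []).length := by
      by_contra hh
      rw [List.drop_eq_nil_of_le (Nat.le_of_not_lt hh)] at hg
      exact (List.cons_ne_nil _ _) hg.symm
    have hc' : (g.getD i [])[j₀]? = some c := by
      have h0 : ((g.getD i []).drop j₀)[0]? = some c := by rw [hg]; rfl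
      rw [List.getElem?_drop] at h0
      simpa using h0
    have hc : (g.getD i []).getD j₀ ' ' = c := by
      rw [List.getD_eq_getElem?_getD, hc']; rfl
    have hrest : rest' = (g.getD i []).drop (j₀ + 1) := by
      have := congrArg List.tail hg
      simpa [List.tail_drop] using this.symm
    have hroll : hasRoll g i j₀ = true ↔ c = '@' := by
      rw [hasRoll_iff]
      constructor
      · rintro ⟨_, _, _, _, hx⟩
        rwa [Int.toNat_natCast, Int.toNat_natCast, hc] at hx
      · intro hx
        exact ⟨Int.natCast_nonneg i, by exact_mod_cast hi, Int.natCast_nonneg j₀,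
          by rw [Int.toNat_natCast]; exact_mod_cast hlen,
          by rw [Int.toNat_natCast, Int.toNat_natCast, hc]; exact hx⟩
    simp only [rowSpec]
    rw [show ((j₀ : Int) + 1) = ((j₀ + 1 : Nat) : Int) by push_cast; ring]
    rw [ih (j₀ + 1) hrest]
    rw [List.length_cons, List.range'_succ, List.map_cons, List.map_cons, List.sum_cons]
    by_cases hcz : c = '@'
    · by_cases hb : (4:Int) ≤ bCountAdj g i j₀
      · have h1 : hasRoll g i j₀ = true := hroll.mpr hcz
        have h2 : isMoveable g i j₀ = false := by rw [moveable_eq]; simp; omega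
        rw [if_pos ⟨hcz, hb⟩]
        simp [h1, h2]
      · have h1 : hasRoll g i j₀ = true := hroll.mpr hcz
        have h2 : isMoveable g i j₀ = true := by rw [moveable_eq]; simp; omega
        rw [if_neg (fun hx => hb hx.2)]
        simp [h1, h2, hcz]
        ring
    · have h1 : hasRoll g i j₀ = false :=
        Bool.eq_false_iff.mpr (fun hh => hcz (hroll.mp hh))
      rw [if_neg (fun hx => hcz hx.1)]
      simp [h1, hcz]

theorem gridSpec_eq (g : List (List Char)) :
    ∀ (rest : List (List Char)) (s : Nat), rest = g.drop s →
      gridSpec g s rest =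
        (((List.range' s rest.length).map (fun (i : Nat) =>
            ((List.range' 0 ((g.getD i []).length)).map (fun (j : Nat) =>
              if hasRoll g (i : Int) (j : Int) && isMoveable g (i : Int) (j : Int) then (1:Int) else 0)).sum)).sum,
         (List.range' s rest.length).map (fun (i : Nat) =>
            String.ofList ((List.range' 0 ((g.getD i []).length)).map (fun (j : Nat) =>
              if hasRoll g (i : Int) (j : Int) && !(isMoveable g (i : Int) (j : Int)) then '@' else '.')))) := by
  intro rest
  induction rest with
  | nil => intro s h; simp [gridSpec]
  | cons row rest' ih =>
    intro s h
    have hg : g.drop s = row :: rest' := h.symm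
    have hs : s < g.length := by
      by_contra hh
      rw [List.drop_eq_nil_of_le (Nat.le_of_not_lt hh)] at hg
      exact (List.cons_ne_nil _ _) hg.symm
    have hrow : g.getD s [] = row := by
      have h0 : (g.drop s)[0]? = some row := by rw [hg]; rfl
      rw [List.getElem?_drop] at h0
      rw [List.getD_eq_getElem?_getD]
      simp only [Nat.add_zero] at h0
      rw [h0]; rfl
    have hrest : rest' = g.drop (s + 1) := by
      have := congrArg List.tail hg
      simpa [List.tail_drop] using this.symm
    simp only [gridSpec]
    have hq := rowSpec_eq g s hs row 0 (by rw [hrow]; simp)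
    simp only [Nat.cast_zero] at hq
    rw [show ((s : Int) + 1) = ((s + 1 : Nat) : Int) by push_cast; ring]
    rw [ih (s + 1) hrest, hq]
    rw [List.length_cons, List.range'_succ, List.map_cons, List.map_cons, List.sum_cons]
    rw [hrow]

theorem sum_map_sub {α : Type} (l : List α) (f h : α → Int) :
    (l.map f).sum - (l.map h).sum = (l.map (fun x => f x - h x)).sum := by
  induction l with
  | nil => simp
  | cons x xs ih => simp only [List.map_cons, List.sum_cons]; omega

theorem sum_flatMap_int {α : Type} (l : List α) (f : α → List Int) :
    (l.flatMap f).sum = (l.map (fun x => (f x).sum)).sum := by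
  induction l with
  | nil => simp
  | cons x xs ih => simp [List.flatMap_cons, List.sum_append, ih]

theorem ng_eq (g : List (List Char)) :
    List.map String.toList ((List.range' 0 g.length).map (fun (i : Nat) =>
      String.ofList ((List.range' 0 ((g.getD i []).length)).map (fun (j : Nat) =>
        if hasRoll g (i : Int) (j : Int) && !(isMoveable g (i : Int) (j : Int)) then '@' else '.'))))
    = (List.range' 0 g.length).map (fun (i : Nat) =>
        (List.range' 0 ((g.getD i []).length)).map (fun (j : Nat) =>
          if hasRoll g (i : Int) (j : Int) && !(isMoveable g (i : Int) (j : Int)) then '@' else '.')) := by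
  rw [List.map_map]
  exact List.map_congr_left (fun i _ => by simp)

theorem counts_eq (g : List (List Char)) :
    ((List.range' 0 g.length).flatMap (fun (i : Nat) =>
        (List.range' 0 ((g.getD i []).length)).map (fun (j : Nat) =>
          if hasRoll g (i : Int) (j : Int) then (1:Int) else 0))).sum
      - ((List.range' 0 ((List.range' 0 g.length).map (fun (i : Nat) =>
        (List.range' 0 ((g.getD i []).length)).map (fun (j : Nat) =>
          if hasRoll g (i : Int) (j : Int) && !(isMoveable g (i : Int) (j : Int)) then '@' else '.'))).length).flatMap (fun (i : Nat) =>
          (List.range' 0 ((((List.range' 0 g.length).map (fun (i : Nat) =>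
        (List.range' 0 ((g.getD i []).length)).map (fun (j : Nat) =>
          if hasRoll g (i : Int) (j : Int) && !(isMoveable g (i : Int) (j : Int)) then '@' else '.'))).getD i []).length)).map (fun (j : Nat) =>
            if hasRoll ((List.range' 0 g.length).map (fun (i : Nat) =>
        (List.range' 0 ((g.getD i []).length)).map (fun (j : Nat) =>
          if hasRoll g (i : Int) (j : Int) && !(isMoveable g (i : Int) (j : Int)) then '@' else '.'))) (i : Int) (j : Int) then (1:Int) else 0))).sum
    = ((List.range' 0 g.length).map (fun (i : Nat) =>
        ((List.range' 0 ((g.getD i []).length)).map (fun (j : Nat) =>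
          if hasRoll g (i : Int) (j : Int) && isMoveable g (i : Int) (j : Int) then (1:Int) else 0)).sum)).sum := by
  rw [sum_flatMap_int, sum_flatMap_int, List.length_map, List.length_range']
  rw [sum_map_sub]
  refine congrArg List.sum (List.map_congr_left (fun i hi => ?_))
  have hiL : i < g.length := by
    have := List.mem_range'_1.mp hi; omega
  have hgetd : ((List.range' 0 g.length).map (fun (i : Nat) =>
        (List.range' 0 ((g.getD i []).length)).map (fun (j : Nat) =>
          if hasRoll g (i : Int) (j : Int) && !(isMoveable g (i : Int) (j : Int)) then '@' else '.'))).getD i []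
      = (List.range' 0 ((g.getD i []).length)).map (fun (j : Nat) =>
          if hasRoll g (i : Int) (j : Int) && !(isMoveable g (i : Int) (j : Int)) then '@' else '.') := by
    rw [List.getD_eq_getElem?_getD, List.getElem?_map]
    have h1 : (List.range' 0 g.length)[i]? = some i := by
      rw [List.getElem?_eq_getElem (by simpa using hiL)]
      simp
    rw [h1]
    rfl
  rw [hgetd, List.length_map, List.length_range']
  rw [sum_map_sub]
  refine congrArg List.sum (List.map_congr_left (fun j hj => ?_))
  have hjL : j < (g.getD i []).length := by
    have := List.mem_range'_1.mp hj; omega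
  have hcell : hasRoll ((List.range' 0 g.length).map (fun (i : Nat) =>
        (List.range' 0 ((g.getD i []).length)).map (fun (j : Nat) =>
          if hasRoll g (i : Int) (j : Int) && !(isMoveable g (i : Int) (j : Int)) then '@' else '.'))) i j
      = (hasRoll g (i : Int) (j : Int) && !(isMoveable g (i : Int) (j : Int))) := by
    have hchar : ((List.range' 0 ((g.getD i []).length)).map (fun (j : Nat) =>
          if hasRoll g (i : Int) (j : Int) && !(isMoveable g (i : Int) (j : Int)) then '@' else '.')).getD j ' '
        = (if hasRoll g (i : Int) (j : Int) && !(isMoveable g (i : Int) (j : Int)) then '@' else '.') := by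
      rw [List.getD_eq_getElem?_getD, List.getElem?_map]
      have h2 : (List.range' 0 ((g.getD i []).length))[j]? = some j := by
        rw [List.getElem?_eq_getElem (by simpa using hjL)]
        simp
      rw [h2]
      rfl
    rcases hbv : (hasRoll g (i : Int) (j : Int) && !(isMoveable g (i : Int) (j : Int))) with _ | _
    · refine Bool.eq_false_iff.mpr (fun hh => ?_)
      obtain ⟨-, -, -, -, hx⟩ := (hasRoll_iff _ _ _).mp hh
      rw [Int.toNat_natCast, Int.toNat_natCast, hgetd, hchar, hbv] at hx
      exact absurd hx (by decide)
    · refine (hasRoll_iff _ _ _).mpr ?_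
      refine ⟨Int.natCast_nonneg i, ?_, Int.natCast_nonneg j, ?_, ?_⟩
      · simp only [List.length_map, List.length_range']
        exact_mod_cast hiL
      · rw [Int.toNat_natCast, hgetd, List.length_map, List.length_range']
        exact_mod_cast hjL
      · rw [Int.toNat_natCast, Int.toNat_natCast, hgetd, hchar, hbv]
        rfl
  rw [hcell]
  rcases hh : hasRoll g (i : Int) (j : Int) with _ | _ <;>
    rcases hm : isMoveable g (i : Int) (j : Int) with _ | _ <;>
    simp [hh, hm]

-- ===== VERDICT =====
theorem update_lines_spec : Claim_equal_update_lines := by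
  intro lines _dom
  unfold Spec_update_lines
  have hgs := gridSpec_eq (lines.map String.toList) (lines.map String.toList) 0 (by simp)
  simp only [Nat.cast_zero] at hgs
  rw [update_lines_alt_eq, hgs]
  have hA : update_lines lines = (
      ((List.range (lines.map String.toList).length).flatMap (fun (i : Nat) =>
        (List.range (((lines.map String.toList).getD i []).length)).map (fun (j : Nat) =>
          if hasRoll (lines.map String.toList) (i : Int) (j : Int) then (1:Int) else 0))).sum
      - ((List.range (List.map String.toList ((List.range (lines.map String.toList).length).map (fun (i : Nat) =>
            String.ofList ((List.range (((lines.map String.toList).getD i []).length)).map (fun (j : Nat) =>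
              if hasRoll (lines.map String.toList) (i : Int) (j : Int) && !(isMoveable (lines.map String.toList) (i : Int) (j : Int)) then '@' else '.')))) ).length).flatMap (fun (i : Nat) =>
          (List.range (((List.map String.toList ((List.range (lines.map String.toList).length).map (fun (i : Nat) =>
            String.ofList ((List.range (((lines.map String.toList).getD i []).length)).map (fun (j : Nat) =>
              if hasRoll (lines.map String.toList) (i : Int) (j : Int) && !(isMoveable (lines.map String.toList) (i : Int) (j : Int)) then '@' else '.')))) ).getD i []).length)).map (fun (j : Nat) =>
            if hasRoll (List.map String.toList ((List.range (lines.map String.toList).length).map (fun (i : Nat) =>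
              String.ofList ((List.range (((lines.map String.toList).getD i []).length)).map (fun (j : Nat) =>
                if hasRoll (lines.map String.toList) (i : Int) (j : Int) && !(isMoveable (lines.map String.toList) (i : Int) (j : Int)) then '@' else '.')))) ) (i : Int) (j : Int) then (1:Int) else 0))).sum,
      (List.range (lines.map String.toList).length).map (fun (i : Nat) =>
        String.ofList ((List.range (((lines.map String.toList).getD i []).length)).map (fun (j : Nat) =>
          if hasRoll (lines.map String.toList) (i : Int) (j : Int) && !(isMoveable (lines.map String.toList) (i : Int) (j : Int)) then '@' else '.')))) := rfl
  rw [hA]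
  simp only [List.range_eq_range']
  rw [ng_eq]
  exact Prod.ext (counts_eq (lines.map String.toList)) rfl
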